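-- pv_equiv track=rewrite | github.com/bobreddy2009/111 | PythonConcepts/sort_letters_and_num.py | sort_things
-- ===== SOURCE A (Python) =====
-- def sort_things(x):
--     abc = ["a", "b", "c", "d", "e", "f", "g", "h", "i", "j", "k", "l", "m", "n", "o", "p", "q", "r", "s", "t", "u", "v",
--            "w", "x", "y", "z"]
--     lowercase = []
--     uppercase = []
--     numbers = []
--     output = ""
--     for i in x:
--         if i in abc:
--             lowercase.append(i)
--         elif i.lower() in abc:
--             uppercase.append(i)
--         try:
--             ints = int(i)
--             numbers.append(i)
--         except:
--             pass
--
--     lowercase.sort()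
--     uppercase.sort()
--     numbers.sort()
--     output += "".join(lowercase)
--     output += "".join(uppercase)
--     output += "".join(numbers)
--     return output
-- ===== SOURCE B (Python) =====
-- def sort_things(x):
--     counts = {}
--     for ch in x:
--         counts[ch] = counts.get(ch, 0) + 1
--     order = "abcdefghijklmnopqrstuvwxyz" "ABCDEFGHIJKLMNOPQRSTUVWXYZ" "0123456789"
--     return "".join(ch * counts.get(ch, 0) for ch in order)
-- ===== Notes on version B (the rewrite author's own statement) =====
-- stated objective: faster
-- what changed: B replaces A's three bucket lists plus three comparison sorts with a single-pass character counter (dict) and one scan over the fixed ordered alphabet a-z, A-Z, 0-9 emitting each character count times (counting sort).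
import Mathlib
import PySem

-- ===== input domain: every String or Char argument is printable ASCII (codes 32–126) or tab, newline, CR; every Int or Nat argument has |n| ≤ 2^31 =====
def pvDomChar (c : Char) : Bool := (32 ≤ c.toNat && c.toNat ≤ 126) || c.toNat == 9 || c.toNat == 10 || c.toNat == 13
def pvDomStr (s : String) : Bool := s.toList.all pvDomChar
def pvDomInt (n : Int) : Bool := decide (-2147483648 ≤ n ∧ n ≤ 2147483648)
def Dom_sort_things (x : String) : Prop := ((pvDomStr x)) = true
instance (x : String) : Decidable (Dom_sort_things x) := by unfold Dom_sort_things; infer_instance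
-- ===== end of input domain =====

-- B replaces A's three bucket lists + three comparison sorts by a one-pass character counter
-- and one scan of the fixed ordered alphabet a-z,A-Z,0-9 (counting sort): O(n) vs O(n log n).

-- ===== PORT A =====
-- A's list `abc` of one-letter strings (strings become List Char).
def pvAbc : List (List Char) :=
  [['a'],['b'],['c'],['d'],['e'],['f'],['g'],['h'],['i'],['j'],['k'],['l'],['m'],
   ['n'],['o'],['p'],['q'],['r'],['s'],['t'],['u'],['v'],['w'],['x'],['y'],['z']]

-- one iteration of A's loop over (lowercase, uppercase, numbers)
def pvStepA (s : List Char × List Char × List Char) (i : Char) :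
    List Char × List Char × List Char :=
  let s1 :=
    if pvAbc.contains [i] then (s.1 ++ [i], s.2.1, s.2.2)
    else if pvAbc.contains (PySem.Chars.lower [i]) then (s.1, s.2.1 ++ [i], s.2.2)
    else s
  -- `try: ints = int(i); numbers.append(i) except: pass`
  if (PySem.Int.ofChars? [i]).isSome then (s1.1, s1.2.1, s1.2.2 ++ [i]) else s1

def sort_things (x : String) : String :=
  let r := x.toList.foldl pvStepA ([], [], [])
  let ls := PySem.List.sorted r.1 (fun c => c)
  let us := PySem.List.sorted r.2.1 (fun c => c)
  let ns := PySem.List.sorted r.2.2 (fun c => c)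
  String.ofList (ls ++ us ++ ns)

-- ===== PORT B =====
def pvLower : List Char :=
  ['a','b','c','d','e','f','g','h','i','j','k','l','m','n','o','p','q','r','s','t','u','v','w','x','y','z']
def pvUpper : List Char :=
  ['A','B','C','D','E','F','G','H','I','J','K','L','M','N','O','P','Q','R','S','T','U','V','W','X','Y','Z']
def pvDigits : List Char := ['0','1','2','3','4','5','6','7','8','9']

def sort_things_alt (x : String) : String :=
  let counts := x.toList.foldl (fun d c => d.insert c (d.getD c 0 + 1))
      (PySem.Dict.empty : PySem.Dict Char Int)
  String.ofList ((pvLower ++ pvUpper ++ pvDigits).flatMap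
    (fun c => List.replicate (counts.getD c 0).toNat c))

-- ===== PRECONDITION & SPEC =====
def Spec_sort_things (x : String) (out : String) : Prop := out = sort_things_alt x
instance (x : String) (out : String) : Decidable (Spec_sort_things x out) := by unfold Spec_sort_things; infer_instance

-- ===== CLAIM (what is proved, stated in full; the proofs are below) =====
def Claim_equal_sort_things : Prop := ∀ (x : String), Dom_sort_things x → Spec_sort_things x (sort_things x)

-- ===== LEMMAS AND PROOFS =====

-- A's three classification tests as predicates on a character
def pvPL (i : Char) : Bool := pvAbc.contains [i]
def pvPU (i : Char) : Bool := !pvAbc.contains [i] && pvAbc.contains (PySem.Chars.lower [i])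
def pvPD (i : Char) : Bool := (PySem.Int.ofChars? [i]).isSome

lemma pvStepA_foldl (cs : List Char) (l u n : List Char) :
    cs.foldl pvStepA (l, u, n) =
      (l ++ cs.filter pvPL, u ++ cs.filter pvPU, n ++ cs.filter pvPD) := by
  induction cs generalizing l u n with
  | nil => simp
  | cons i cs ih =>
    simp only [List.foldl_cons, List.filter_cons]
    by_cases hL : [i] ∈ pvAbc <;>
      by_cases hU : PySem.Chars.lower [i] ∈ pvAbc <;>
        by_cases hD : (PySem.Int.ofChars? [i]).isSome = true <;>
          simp [pvStepA, pvPL, pvPU, pvPD, hL, hU, hD, ih]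

-- on the ASCII domain the three tests are exactly membership in the three alphabets
lemma pvClassify_dom (c : Char) (h : pvDomChar c = true) :
    pvPL c = pvLower.contains c ∧ pvPU c = pvUpper.contains c ∧ pvPD c = pvDigits.contains c := by
  have key : ∀ m : Nat, m < 127 → pvDomChar (Char.ofNat m) = true →
      (pvPL (Char.ofNat m) = pvLower.contains (Char.ofNat m) ∧
       pvPU (Char.ofNat m) = pvUpper.contains (Char.ofNat m) ∧
       pvPD (Char.ofNat m) = pvDigits.contains (Char.ofNat m)) := by decide
  have hlt : c.toNat < 127 := by
    simp only [pvDomChar, Bool.or_eq_true, Bool.and_eq_true, decide_eq_true_eq, beq_iff_eq] at h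
    omega
  have := key c.toNat hlt
  rw [Char.ofNat_toNat] at this
  exact this h

lemma pvFlatMap_congr {α β : Type} (l : List α) (f g : α → List β)
    (h : ∀ c ∈ l, f c = g c) : l.flatMap f = l.flatMap g := by
  induction l with
  | nil => rfl
  | cons a t ih =>
    simp only [List.flatMap_cons, h a (by simp), ih (fun c hc => h c (by simp [hc]))]

lemma pvPerm_part (alpha : List Char) : ∀ (l : List Char), alpha.Nodup →
    (∀ c ∈ l, c ∈ alpha) →
    (alpha.flatMap fun c => List.replicate (l.count c) c).Perm l := by
  induction alpha with
  | nil =>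
    intro l _ hmem
    have : l = [] := by
      cases l with
      | nil => rfl
      | cons a t => exact absurd (hmem a (by simp)) (by simp)
    simp [this]
  | cons a rest ih =>
    intro l hnd hmem
    have hna : a ∉ rest := by simp [List.nodup_cons] at hnd; exact hnd.1
    have hndr : rest.Nodup := by simp [List.nodup_cons] at hnd; exact hnd.2
    set l' := l.filter (fun x => !(x == a)) with hl'
    have hcongr : (rest.flatMap fun c => List.replicate (l.count c) c)
        = rest.flatMap fun c => List.replicate (l'.count c) c := by
      refine pvFlatMap_congr _ _ _ (fun c hc => ?_)
      have hca : c ≠ a := fun he => hna (he ▸ hc)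
      rw [hl', List.count_filter (by simp [hca])]
    have hmem' : ∀ c ∈ l', c ∈ rest := by
      intro c hc
      rw [hl', List.mem_filter] at hc
      have hca : c ≠ a := by simpa using hc.2
      rcases List.mem_cons.mp (hmem c hc.1) with h | h
      · exact absurd h hca
      · exact h
    have ihp := ih l' hndr hmem'
    have e1 : ((a :: rest).flatMap fun c => List.replicate (l.count c) c)
        = l.filter (· == a) ++ (rest.flatMap fun c => List.replicate (l'.count c) c) := by
      rw [List.flatMap_cons, hcongr, List.filter_beq]
    rw [e1]
    exact ((List.Perm.refl _).append ihp).trans (List.filter_append_perm _ l)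

lemma pvPairwise_part (alpha : List Char) (n : Char → Nat)
    (h : alpha.Pairwise (· < ·)) :
    (alpha.flatMap fun c => List.replicate (n c) c).Pairwise (· ≤ ·) := by
  induction alpha with
  | nil => simp
  | cons a rest ih =>
    rw [List.pairwise_cons] at h
    rw [List.flatMap_cons, List.pairwise_append]
    refine ⟨List.pairwise_replicate.2 (Or.inr le_rfl), ih h.2, ?_⟩
    intro x hx y hy
    obtain rfl := List.eq_of_mem_replicate hx
    rcases List.mem_flatMap.1 hy with ⟨c, hc, hyc⟩
    obtain rfl := List.eq_of_mem_replicate hyc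
    exact le_of_lt (h.1 _ hc)

-- counting sort names Python's sorted: sorted(l) is the ordered-alphabet scan of the counts
lemma pvCountSort (alpha l : List Char) (hp : alpha.Pairwise (· < ·))
    (hmem : ∀ c ∈ l, c ∈ alpha) :
    PySem.List.sorted l (fun c => c) =
      alpha.flatMap (fun c => List.replicate (l.count c) c) := by
  exact PySem.List.sorted_id_eq_of_perm_of_pairwise _ _
    (pvPerm_part alpha l hp.nodup hmem) (pvPairwise_part alpha _ hp)

-- for one bucket: sorted(filter p cs) is the alphabet scan of counts over the FULL cs
lemma pvBucket (alpha : List Char) (p : Char → Bool) (cs : List Char)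
    (hp : alpha.Pairwise (· < ·))
    (hmem : ∀ c ∈ cs, p c = true → c ∈ alpha)
    (htrue : ∀ c ∈ alpha, p c = true) :
    PySem.List.sorted (cs.filter p) (fun c => c) =
      alpha.flatMap (fun c => List.replicate (cs.count c) c) := by
  rw [pvCountSort alpha (cs.filter p) hp
    (fun c hc => hmem c (List.mem_filter.1 hc).1 (List.mem_filter.1 hc).2)]
  exact pvFlatMap_congr _ _ _ (fun c hc => by
    rw [List.count_filter (htrue c hc)])

-- ===== VERDICT (by name: the statement is the Claim_ definition above) =====
lemma pvLower_sorted : pvLower.Pairwise (· < ·) := by decide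
lemma pvUpper_sorted : pvUpper.Pairwise (· < ·) := by decide
lemma pvDigits_sorted : pvDigits.Pairwise (· < ·) := by decide
lemma pvPL_true : ∀ c ∈ pvLower, pvPL c = true := by
  have h : pvLower.all pvPL = true := by rfl
  exact List.all_eq_true.1 h
lemma pvPU_true : ∀ c ∈ pvUpper, pvPU c = true := by
  have h : pvUpper.all pvPU = true := by rfl
  exact List.all_eq_true.1 h
lemma pvPD_true : ∀ c ∈ pvDigits, pvPD c = true := by
  have h : pvDigits.all pvPD = true := by rfl
  exact List.all_eq_true.1 h

theorem sort_things_spec : Claim_equal_sort_things := by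
  intro x hdom
  unfold Spec_sort_things sort_things sort_things_alt
  have hall : ∀ c ∈ x.toList, pvDomChar c = true := by
    have := hdom; unfold Dom_sort_things pvDomStr at this
    exact fun c hc => List.all_eq_true.1 this c hc
  simp only [pvStepA_foldl, List.nil_append]
  have hcounts : ∀ c : Char,
      ((x.toList.foldl (fun d c => d.insert c (d.getD c 0 + 1))
        (PySem.Dict.empty : PySem.Dict Char Int)).getD c 0).toNat = x.toList.count c := by
    intro c
    rw [PySem.Dict.getD_foldl_insert_add_one]
    simp [PySem.Dict.empty, PySem.Dict.getD, PySem.Dict.get?]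
  have hL := pvBucket pvLower pvPL x.toList pvLower_sorted
    (fun c hc hpc => by
      have h := (pvClassify_dom c (hall c hc)).1
      rw [hpc] at h; exact List.contains_iff_mem.mp h.symm)
    pvPL_true
  have hU := pvBucket pvUpper pvPU x.toList pvUpper_sorted
    (fun c hc hpc => by
      have h := (pvClassify_dom c (hall c hc)).2.1
      rw [hpc] at h; exact List.contains_iff_mem.mp h.symm)
    pvPU_true
  have hD := pvBucket pvDigits pvPD x.toList pvDigits_sorted
    (fun c hc hpc => by
      have h := (pvClassify_dom c (hall c hc)).2.2
      rw [hpc] at h; exact List.contains_iff_mem.mp h.symm)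
    pvPD_true
  have e : ∀ alpha : List Char,
      (alpha.flatMap fun c => List.replicate
        ((x.toList.foldl (fun d c => d.insert c (d.getD c 0 + 1))
          (PySem.Dict.empty : PySem.Dict Char Int)).getD c 0).toNat c)
      = alpha.flatMap fun c => List.replicate (x.toList.count c) c :=
    fun alpha => pvFlatMap_congr _ _ _ (fun c _ => by rw [hcounts])
  rw [List.flatMap_append, List.flatMap_append, e, e, e, hL, hU, hD]
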